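-- pv_equiv track=rewrite | github.com/ljtljt1997/SapphireCS839 | stage1/codes/839.py | chopoff
-- ===== SOURCE A (Python) =====
-- def chopoff(name):
--     s =  set()
--     name = name.split()
--     l = len(name)
--     k = l - 1
--     while k >= 0:
--         for i in range(l-k):
--             s.add(' '.join(name[i:i + k + 1]))
--         k -= 1
--     return s
-- ===== SOURCE B (Python) =====
-- def chopoff(name):
--     words = name.split()
--     l = len(words)
--     # one row per start index: all joins starting there, built by extending one
--     # accumulator string (no per-pair slicing/joining)
--     rows = []
--     for i, w in enumerate(words):
--         cur = w
--         row = [cur]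
--         for nxt in words[i + 1:]:
--             cur = cur + ' ' + nxt
--             row.append(cur)
--         rows.append(row)
--     s = set()
--     for m in reversed(range(1, l + 1)):
--         for i in range(l - m + 1):
--             s.add(rows[i][m - 1])
--     return s
-- ===== Notes on version B (the rewrite author's own statement) =====
-- stated objective: alternative
-- what changed: Instead of re-slicing and re-joining the word list for every (length, start) pair, B builds for each start index one growing accumulator string (extending it word by word) and then collects those precomputed joins into the set.
import Mathlib
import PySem

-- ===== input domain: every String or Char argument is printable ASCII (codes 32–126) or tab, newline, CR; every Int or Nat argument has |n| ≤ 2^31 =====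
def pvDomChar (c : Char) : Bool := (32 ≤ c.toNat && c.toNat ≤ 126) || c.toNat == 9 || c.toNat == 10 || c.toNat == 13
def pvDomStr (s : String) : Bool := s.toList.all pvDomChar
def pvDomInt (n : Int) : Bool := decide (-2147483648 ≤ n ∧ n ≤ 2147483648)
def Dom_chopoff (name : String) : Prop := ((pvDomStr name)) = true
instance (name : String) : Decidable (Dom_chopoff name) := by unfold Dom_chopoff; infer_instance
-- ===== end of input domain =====

-- B replaces A's per-(length,start) re-slice-and-rejoin by one growing accumulator string per
-- start index (objective: alternative decomposition).

-- ===== PORT A =====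
-- inner 'for i in range(l-k): s.add(' '.join(name[i:i+k+1]))'
def chopoffAddRow (ws : List String) (l k : Int) (s : PySem.Set String) : PySem.Set String :=
  (PySem.List.pyRange 0 (l - k)).foldl
    (fun acc i =>
      PySem.Set.add acc (PySem.Str.join " " (PySem.List.slice ws (some i) (some (i + k + 1))))) s

-- 'while k >= 0: …; k -= 1'
def chopoffWhile (ws : List String) (l k : Int) (s : PySem.Set String) : PySem.Set String :=
  if 0 ≤ k then chopoffWhile ws l (k - 1) (chopoffAddRow ws l k s) else s
termination_by (k + 1).toNat
decreasing_by omega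

def chopoff (name : String) : List String :=
  let ws := PySem.Str.split₀ name
  let l : Int := ws.length
  chopoffWhile ws l (l - 1) PySem.Set.empty

-- ===== PORT B =====
-- 'cur + ' ' + nxt' (Python str concatenation, exact: character-list append)
def catWord (a b : String) : String := String.ofList (a.toList ++ ' ' :: b.toList)

-- inner accumulator loop: cur grows by one word each step, row collects every value cur takes
def chopoffRow (w : String) (rest : List String) : List String :=
  (rest.foldl (fun st nxt =>
      let cur := catWord st.1 nxt
      (cur, st.2 ++ [cur])) (w, [w])).2

def chopoff_alt (name : String) : List String :=
  let words := PySem.Str.split₀ name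
  let l : Int := words.length
  let rows : List (List String) :=
    (PySem.List.enumerate words).foldl
      (fun rows p => rows ++ [chopoffRow p.2 (PySem.List.slice words (some (p.1 + 1)) none)]) []
  -- gather rows[i][m-1]; both indices are always in range, so pyGetD's default is never used
  (PySem.List.pyRange 1 (l + 1)).reverse.foldl
    (fun s m =>
      (PySem.List.pyRange 0 (l - m + 1)).foldl
        (fun s i => PySem.Set.add s (PySem.List.pyGetD (PySem.List.pyGetD rows i []) (m - 1) "")) s)
    PySem.Set.empty

-- ===== PRECONDITION & SPEC =====
def Spec_chopoff (name : String) (out : List String) : Prop := out = chopoff_alt name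
instance (name : String) (out : List String) : Decidable (Spec_chopoff name out) := by unfold Spec_chopoff; infer_instance

-- ===== CLAIM (what is proved, stated in full; the proofs are below) =====
def Claim_equal_chopoff : Prop := ∀ (name : String), Dom_chopoff name → Spec_chopoff name (chopoff name)

-- ===== LEMMAS AND PROOFS =====

-- the values the accumulator cur takes while folding catWord over rest
def chopCats (cur : String) : List String → List String
  | [] => []
  | x :: xs => catWord cur x :: chopCats (catWord cur x) xs

theorem join_single (w : String) : PySem.Str.join " " [w] = w := by
  apply String.toList_inj.mp
  simp [PySem.Str.toList_join, PySem.Chars.join_singleton]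

theorem join_append_chars (sep q : List Char) :
    ∀ (p : List Char) (ps : List (List Char)),
    PySem.Chars.join sep ((p :: ps) ++ [q]) = PySem.Chars.join sep (p :: ps) ++ sep ++ q := by
  intro p ps
  induction ps generalizing p with
  | nil => simp [PySem.Chars.join_cons_cons, PySem.Chars.join_singleton]
  | cons r rs ih =>
      have h1 : ((p :: r :: rs) ++ [q]) = p :: ((r :: rs) ++ [q]) := by simp
      rw [h1]
      have h2 : (r :: rs) ++ [q] = r :: (rs ++ [q]) := by simp
      rw [h2, PySem.Chars.join_cons_cons, ← h2, ih r, PySem.Chars.join_cons_cons]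
      simp

theorem cat_join (w y : String) (pre : List String) :
    catWord (PySem.Str.join " " (w :: pre)) y = PySem.Str.join " " (w :: (pre ++ [y])) := by
  apply String.toList_inj.mp
  simp [catWord, PySem.Str.toList_join]
  have := join_append_chars " ".toList y.toList w.toList (pre.map String.toList)
  simp at this ⊢
  rw [this]

theorem chopCats_eq (rest : List String) : ∀ (w : String) (pre : List String),
    chopCats (PySem.Str.join " " (w :: pre)) rest
      = (List.range rest.length).map
          (fun t => PySem.Str.join " " (w :: (pre ++ rest.take (t + 1)))) := by
  induction rest with
  | nil => simp [chopCats]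
  | cons x xs ih =>
      intro w pre
      show catWord (PySem.Str.join " " (w :: pre)) x :: chopCats (catWord (PySem.Str.join " " (w :: pre)) x) xs = _
      rw [cat_join w x pre, ih w (pre ++ [x])]
      simp [List.range_succ_eq_map, Function.comp, List.map_map]

theorem row_aux (rest : List String) : ∀ (cur : String) (acc : List String),
    (rest.foldl (fun st nxt =>
        let cur := catWord st.1 nxt
        (cur, st.2 ++ [cur])) (cur, acc)).2 = acc ++ chopCats cur rest := by
  induction rest with
  | nil => simp [chopCats]
  | cons x xs ih =>
      intro cur acc
      simp only [List.foldl_cons]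
      rw [ih]
      simp [chopCats]

theorem chopoffRow_eq (w : String) (rest : List String) :
    chopoffRow w rest
      = (List.range (rest.length + 1)).map
          (fun t => PySem.Str.join " " (w :: rest.take t)) := by
  unfold chopoffRow
  rw [row_aux]
  have h := chopCats_eq rest w []
  rw [join_single] at h
  rw [h]
  simp [List.range_succ_eq_map, Function.comp, List.map_map, join_single]

theorem rows_get (ws : List String) (i : Nat) (hi : i < ws.length) :
    PySem.List.pyGetD
      ((PySem.List.enumerate ws).foldl
        (fun rows p => rows ++ [chopoffRow p.2 (PySem.List.slice ws (some (p.1 + 1)) none)]) [])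
      (i : Int) []
    = (List.range (ws.length - i)).map
        (fun t => PySem.Str.join " " ((ws.drop i).take (t + 1))) := by
  rw [PySem.List.foldl_append_singleton_eq_map, PySem.List.pyGetD_natCast]
  simp only [List.nil_append]
  have hlen : (PySem.List.enumerate ws).length = ws.length := by simp
  have hget : ((PySem.List.enumerate ws).map
      (fun p => chopoffRow p.2 (PySem.List.slice ws (some (p.1 + 1)) none)))[i]'(by simp [hlen, hi])
      = chopoffRow ws[i] (PySem.List.slice ws (some ((i : Int) + 1)) none) := by
    have he : (PySem.List.enumerate ws)[i]'(by simp [hlen, hi]) = ((i : Int), ws[i]) := by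
      apply List.getElem_eq_iff _ |>.mpr
      simp
    simp only [List.getElem_map, he]
  rw [List.getD_eq_getElem _ _ (by simp [hlen, hi]), hget]
  have hslice : PySem.List.slice ws (some ((i : Int) + 1)) none = ws.drop (i + 1) := by
    have : ((i : Int) + 1) = ((i + 1 : Nat) : Int) := by push_cast; ring
    rw [this, PySem.List.slice_from_natCast]
  rw [hslice, chopoffRow_eq]
  have hdrop : ws.drop i = ws[i] :: ws.drop (i + 1) := by
    exact (List.getElem_cons_drop hi).symm
  have hlen2 : (ws.drop (i + 1)).length + 1 = ws.length - i := by
    simp [List.length_drop]; omega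
  rw [hlen2]
  apply List.map_congr_left
  intro t ht
  simp at ht
  congr 1
  rw [hdrop]
  rw [List.take_succ_cons]

theorem inner_eq (ws : List String) (m : Nat) (hm1 : 1 ≤ m) (hml : m ≤ ws.length) (s : PySem.Set String) :
    chopoffAddRow ws (ws.length : Int) ((m : Int) - 1) s
      = (PySem.List.pyRange 0 ((ws.length : Int) - (m : Int) + 1)).foldl
          (fun s i => PySem.Set.add s (PySem.List.pyGetD
            (PySem.List.pyGetD
              ((PySem.List.enumerate ws).foldl
                (fun rows p => rows ++ [chopoffRow p.2 (PySem.List.slice ws (some (p.1 + 1)) none)]) [])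
              i [])
            ((m : Int) - 1) "")) s := by
  unfold chopoffAddRow
  have hr : (ws.length : Int) - ((m : Int) - 1) = (ws.length : Int) - (m : Int) + 1 := by ring
  rw [hr]
  apply PySem.List.foldl_congr_mem
  intro acc i hi
  rw [PySem.List.mem_pyRange_one] at hi
  obtain ⟨hi0, hi1⟩ := hi
  set iN := i.toNat with hiN
  have hie : i = (iN : Int) := by omega
  have hiL : iN < ws.length := by omega
  have hiLm : iN < ws.length - m + 1 := by omega
  congr 1
  -- A's slice-and-join value = B's precomputed row entry
  have hb : ((iN : Int) + ((m : Int) - 1) + 1) = ((iN : Int) + (m : Int)) := by ring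
  rw [hie, hb, PySem.List.slice_natCast_add, rows_get ws iN hiL]
  have hm' : ((m : Int) - 1) = ((m - 1 : Nat) : Int) := by omega
  rw [hm', PySem.List.pyGetD_natCast]
  rw [List.getD_eq_getElem _ _ (by simp; omega)]
  simp only [List.getElem_map, List.getElem_range]
  have hmm : m - 1 + 1 = m := by omega
  rw [hmm]

theorem while_eq (ws : List String) : ∀ (n : Nat), n ≤ ws.length → ∀ (s : PySem.Set String),
    chopoffWhile ws (ws.length : Int) ((n : Int) - 1) s
      = (PySem.List.pyRange 1 ((n : Int) + 1)).reverse.foldl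
          (fun s m =>
            (PySem.List.pyRange 0 ((ws.length : Int) - m + 1)).foldl
              (fun s i => PySem.Set.add s (PySem.List.pyGetD
                (PySem.List.pyGetD
                  ((PySem.List.enumerate ws).foldl
                    (fun rows p => rows ++ [chopoffRow p.2 (PySem.List.slice ws (some (p.1 + 1)) none)]) [])
                  i [])
                (m - 1) "")) s) s := by
  intro n
  induction n with
  | zero =>
      intro _ s
      rw [chopoffWhile]
      norm_num
  | succ n ih =>
      intro hn s
      have h1 : ((n + 1 : Nat) : Int) - 1 = (n : Int) := by push_cast; ring
      rw [chopoffWhile, h1, if_pos (by positivity)]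
      have e1 : ((n + 1 : Nat) : Int) + 1 = ((n : Int) + 1) + 1 := by push_cast; ring
      have e2 : PySem.List.pyRange ((n : Int) + 1) ((n : Int) + 1 + 1) = [(n : Int) + 1] := by
        rw [PySem.List.pyRange_one_cons (by omega)]
        simp [pysem]
      have hsplit : PySem.List.pyRange 1 (((n + 1 : Nat) : Int) + 1)
          = PySem.List.pyRange 1 ((n : Int) + 1) ++ [(n : Int) + 1] := by
        rw [e1, PySem.List.pyRange_one_append 1 ((n : Int) + 1) ((n : Int) + 1 + 1) (by omega) (by omega), e2]
      rw [hsplit, List.reverse_append]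
      simp only [List.reverse_singleton, List.singleton_append, List.foldl_cons]
      have hinner := inner_eq ws (n + 1) (by omega) hn s
      have e3 : ((n + 1 : Nat) : Int) - 1 = (n : Int) := by push_cast; ring
      have e4 : ((n + 1 : Nat) : Int) = (n : Int) + 1 := by push_cast; ring
      rw [e3, e4] at hinner
      have e5 : ((n : Int) + 1 - 1) = (n : Int) := by ring
      rw [e5, ← hinner]
      exact ih (by omega) _

-- ===== VERDICT (by name: the statement is the Claim_ definition above) =====
theorem chopoff_spec : Claim_equal_chopoff := by
  intro name _
  unfold Spec_chopoff chopoff chopoff_alt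
  exact while_eq (PySem.Str.split₀ name) (PySem.Str.split₀ name).length le_rfl PySem.Set.empty
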